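-- pv_equiv track=rewrite | github.com/FloopyFlop/CS1112-Project5 | robot.py | travel_steps
-- ===== SOURCE A (Python) =====
-- def travel_steps(curr, dest):
--     """
--     Returns a valid list of locations that form a path between two locations,
--     `curr` and `dest`. Each location in the list corresponds to one time step.
--     The first location in the returned list should be `curr`, the robot's
--     current location; the last location in the list should be `dest`, the
--     robot's destination.  The return type is list; each element inside the
--     list is a length 2 list storing an x-coordinate and a y-coordinate.
--
--     While there are multiple ways to construct the path, one simple solution
--     is to have the robot first move along the x-direction, then along the
--     y-direction.
--
--     Parameters:
--     -----------
--
--     curr: list; a length 2 list storing the robot's current x-y coordinate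
--
--     dest: list; a length 2 list storing the robot's destiny x-y coordinate
--
--     If `curr` and `dest` refer to the same location, return a length 1 list
--     storing this shared location.
--
--     """
--     # Initialize the path with the current location
--     path = [curr]
--
--     # Extract current and destination coordinates
--     curr_x = curr[0]
--     curr_y = curr[1]
--     dest_x = dest[0]
--     dest_y = dest[1]
--
--     # Move along the x-direction first
--     # Determine the direction of movement in x
--     if dest_x > curr_x:
--         # Move right (increase x)
--         for x in range(curr_x + 1, dest_x + 1):
--             path.append([x, curr_y])
--     elif dest_x < curr_x:
--         # Move left (decrease x)
--         for x in range(curr_x - 1, dest_x - 1, -1):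
--             path.append([x, curr_y])
--
--     # Move along the y-direction
--     # Determine the direction of movement in y
--     if dest_y > curr_y:
--         # Move up (increase y)
--         for y in range(curr_y + 1, dest_y + 1):
--             path.append([dest_x, y])
--     elif dest_y < curr_y:
--         # Move down (decrease y)
--         for y in range(curr_y - 1, dest_y - 1, -1):
--             path.append([dest_x, y])
--
--     return path
-- ===== SOURCE B (Python) =====
-- def travel_steps(curr, dest):
--     path = [curr]
--     cx, cy = curr[0], curr[1]
--     dx, dy = dest[0], dest[1]
--     total = abs(dx - cx) + abs(dy - cy)
--     for _ in range(total):
--         if cx != dx: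
--             cx += 1 if dx > cx else -1
--         else:
--             cy += 1 if dy > cy else -1
--         path.append([cx, cy])
--     return path
-- ===== Notes on version B (the rewrite author's own statement) =====
-- stated objective: alternative
-- what changed: Replaces A's four directional range loops (x-phase then y-phase, each with a separate ascending/descending branch) by one counted loop over the total Manhattan distance that maintains a mutable current position and branches per step.
import Mathlib
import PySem

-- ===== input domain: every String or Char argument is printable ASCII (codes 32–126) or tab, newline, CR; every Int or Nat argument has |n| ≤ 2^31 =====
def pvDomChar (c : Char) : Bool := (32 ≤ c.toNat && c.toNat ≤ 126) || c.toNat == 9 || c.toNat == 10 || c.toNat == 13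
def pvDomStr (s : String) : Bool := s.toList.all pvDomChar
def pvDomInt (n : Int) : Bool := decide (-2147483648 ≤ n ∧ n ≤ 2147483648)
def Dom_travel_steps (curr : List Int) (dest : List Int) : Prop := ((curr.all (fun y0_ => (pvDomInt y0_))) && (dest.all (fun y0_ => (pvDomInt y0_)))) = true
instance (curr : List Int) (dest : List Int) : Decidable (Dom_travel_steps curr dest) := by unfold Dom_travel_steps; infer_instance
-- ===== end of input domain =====

-- B replaces A's four directional range loops by one counted loop over the total Manhattan
-- distance maintaining a mutable position (objective: alternative decomposition, same cost).


-- ===== PORT A =====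
-- literal transliteration of A: x-phase loop (ascending or descending range), then y-phase loop
def travel_steps (curr : List Int) (dest : List Int) : List (List Int) :=
  match PySem.List.pyGet? curr 0, PySem.List.pyGet? curr 1,
        PySem.List.pyGet? dest 0, PySem.List.pyGet? dest 1 with
  | some curr_x, some curr_y, some dest_x, some dest_y =>
      let path := [curr]
      let path :=
        if dest_x > curr_x then
          (PySem.List.pyRange (curr_x + 1) (dest_x + 1) 1).foldl
            (fun p x => p ++ [[x, curr_y]]) path
        else if dest_x < curr_x then
          (PySem.List.pyRange (curr_x - 1) (dest_x - 1) (-1)).foldl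
            (fun p x => p ++ [[x, curr_y]]) path
        else path
      let path :=
        if dest_y > curr_y then
          (PySem.List.pyRange (curr_y + 1) (dest_y + 1) 1).foldl
            (fun p y => p ++ [[dest_x, y]]) path
        else if dest_y < curr_y then
          (PySem.List.pyRange (curr_y - 1) (dest_y - 1) (-1)).foldl
            (fun p y => p ++ [[dest_x, y]]) path
        else path
      path
  | _, _, _, _ => []   -- IndexError: excluded by Pre_

-- ===== PORT B =====
-- one step of B's loop body: move x toward dx if not there yet, else move y toward dy, append
def stepB (dx dy : Int) (s : Int × Int × List (List Int)) : Int × Int × List (List Int) :=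
  let (cx, cy, p) := s
  if cx ≠ dx then
    let cx' := if dx > cx then cx + 1 else cx - 1
    (cx', cy, p ++ [[cx', cy]])
  else
    let cy' := if dy > cy then cy + 1 else cy - 1
    (cx, cy', p ++ [[cx, cy']])

def travel_steps_alt (curr : List Int) (dest : List Int) : List (List Int) :=
  match PySem.List.pyGet? curr 0 with
  | none => []   -- IndexError: excluded by Pre_
  | some cx =>
    match PySem.List.pyGet? curr 1 with
    | none => []
    | some cy =>
      match PySem.List.pyGet? dest 0 with
      | none => []
      | some dx =>
        match PySem.List.pyGet? dest 1 with
        | none => []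
        | some dy =>
          let total := (dx - cx).natAbs + (dy - cy).natAbs
          ((List.range total).foldl (fun s _ => stepB dx dy s) (cx, cy, [curr])).2.2

-- ===== PRECONDITION & SPEC =====
-- A (and B) raise IndexError when either argument has fewer than 2 elements
def Pre_travel_steps (curr : List Int) (dest : List Int) : Prop :=
  2 ≤ curr.length ∧ 2 ≤ dest.length
instance (curr : List Int) (dest : List Int) : Decidable (Pre_travel_steps curr dest) := by
  unfold Pre_travel_steps; infer_instance
def pvWitness_travel_steps : List Int × List Int := ([1, 2], [4, -1])
def Spec_travel_steps (curr : List Int) (dest : List Int) (out : List (List Int)) : Prop := out = travel_steps_alt curr dest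
instance (curr : List Int) (dest : List Int) (out : List (List Int)) : Decidable (Spec_travel_steps curr dest out) := by unfold Spec_travel_steps; infer_instance

-- ===== CLAIM (what is proved, stated in full; the proofs are below) =====
def Claim_equal_travel_steps : Prop := ∀ (curr : List Int) (dest : List Int), Dom_travel_steps curr dest → Pre_travel_steps curr dest → Spec_travel_steps curr dest (travel_steps curr dest)

-- ===== LEMMAS AND PROOFS =====

-- the x-phase segment A appends (in map form), as a function of the running x
def xseg (dx cy cx : Int) : List (List Int) :=
  if dx > cx then (PySem.List.pyRange (cx + 1) (dx + 1) 1).map (fun x => [x, cy])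
  else if dx < cx then (PySem.List.pyRange (cx - 1) (dx - 1) (-1)).map (fun x => [x, cy])
  else []

-- the y-phase segment A appends (in map form), as a function of the running y
def yseg (dx dy cy : Int) : List (List Int) :=
  if dy > cy then (PySem.List.pyRange (cy + 1) (dy + 1) 1).map (fun y => [dx, y])
  else if dy < cy then (PySem.List.pyRange (cy - 1) (dy - 1) (-1)).map (fun y => [dx, y])
  else []

lemma foldl_range_const {α : Type} (g : α → α) (init : α) (n : Nat) :
    (List.range n).foldl (fun s _ => g s) init = g^[n] init := by
  induction n generalizing init with
  | zero => rfl
  | succ n ih =>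
      rw [List.range_succ, List.foldl_append, ih, Function.iterate_succ_apply']
      simp

lemma xseg_cons (dx cy cx : Int) (h : cx ≠ dx) :
    xseg dx cy cx = [if dx > cx then cx + 1 else cx - 1, cy] ::
      xseg dx cy (if dx > cx then cx + 1 else cx - 1) := by
  unfold xseg
  rcases lt_or_gt_of_ne h with hlt | hgt
  · -- cx < dx : ascending
    rw [if_pos hlt, if_pos hlt, PySem.List.pyRange_one_cons (by omega)]
    by_cases h2 : dx > cx + 1
    · rw [if_pos h2]; simp
    · have hdx : dx = cx + 1 := by omega
      rw [if_neg h2, if_neg (by omega)]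
      simp [hdx]
  · -- dx < cx : descending
    rw [if_neg (by omega), if_pos hgt, if_neg (by omega), PySem.List.pyRange_neg_one_cons (by omega)]
    by_cases h2 : dx < cx - 1
    · rw [if_neg (by omega), if_pos h2]; simp
    · have hdx : dx = cx - 1 := by omega
      rw [if_neg (by omega), if_neg (by omega)]
      simp [hdx]

lemma yseg_cons (dx dy cy : Int) (h : cy ≠ dy) :
    yseg dx dy cy = [dx, if dy > cy then cy + 1 else cy - 1] ::
      yseg dx dy (if dy > cy then cy + 1 else cy - 1) := by
  unfold yseg
  rcases lt_or_gt_of_ne h with hlt | hgt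
  · rw [if_pos hlt, if_pos hlt, PySem.List.pyRange_one_cons (by omega)]
    by_cases h2 : dy > cy + 1
    · rw [if_pos h2]; simp
    · have hdy : dy = cy + 1 := by omega
      rw [if_neg h2, if_neg (by omega)]
      simp [hdy]
  · rw [if_neg (by omega), if_pos hgt, if_neg (by omega), PySem.List.pyRange_neg_one_cons (by omega)]
    by_cases h2 : dy < cy - 1
    · rw [if_neg (by omega), if_pos h2]; simp
    · have hdy : dy = cy - 1 := by omega
      rw [if_neg (by omega), if_neg (by omega)]
      simp [hdy]

lemma stepB_iter_x (dx dy : Int) : ∀ (n : Nat) (cx cy : Int) (p : List (List Int)),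
    (dx - cx).natAbs = n →
    (stepB dx dy)^[n] (cx, cy, p) = (dx, cy, p ++ xseg dx cy cx) := by
  intro n
  induction n with
  | zero =>
      intro cx cy p h
      have : cx = dx := by omega
      subst this
      simp [xseg]
  | succ n ih =>
      intro cx cy p h
      have hne : cx ≠ dx := by omega
      rw [Function.iterate_succ_apply]
      have hstep : stepB dx dy (cx, cy, p) =
          ((if dx > cx then cx + 1 else cx - 1), cy,
            p ++ [[if dx > cx then cx + 1 else cx - 1, cy]]) := by
        simp [stepB, hne]
      rw [hstep, ih _ _ _ (by rcases lt_or_gt_of_ne hne with h1 | h1 <;> simp [h1] <;> omega),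
        xseg_cons dx cy cx hne]
      simp

lemma stepB_iter_y (dx dy : Int) : ∀ (n : Nat) (cy : Int) (p : List (List Int)),
    (dy - cy).natAbs = n →
    (stepB dx dy)^[n] (dx, cy, p) = (dx, dy, p ++ yseg dx dy cy) := by
  intro n
  induction n with
  | zero =>
      intro cy p h
      have : cy = dy := by omega
      subst this
      simp [yseg]
  | succ n ih =>
      intro cy p h
      have hne : cy ≠ dy := by omega
      rw [Function.iterate_succ_apply]
      have hstep : stepB dx dy (dx, cy, p) =
          (dx, (if dy > cy then cy + 1 else cy - 1),
            p ++ [[dx, if dy > cy then cy + 1 else cy - 1]]) := by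
        simp [stepB]
      rw [hstep, ih _ _ (by rcases lt_or_gt_of_ne hne with h1 | h1 <;> simp [h1] <;> omega),
        yseg_cons dx dy cy hne]
      simp

-- ===== VERDICT (by name: the statement is the Claim_ definition above) =====
theorem travel_steps_spec : Claim_equal_travel_steps := by
  intro curr dest _ hpre
  obtain ⟨hc, hd⟩ := hpre
  match curr, dest with
  | c0 :: c1 :: cr, d0 :: d1 :: dr =>
    show Spec_travel_steps _ _ _
    unfold Spec_travel_steps travel_steps travel_steps_alt
    rw [show PySem.List.pyGet? (c0 :: c1 :: cr) 0 = some c0 by simp [pysem],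
        show PySem.List.pyGet? (c0 :: c1 :: cr) 1 = some c1 by simp [pysem],
        show PySem.List.pyGet? (d0 :: d1 :: dr) 0 = some d0 by simp [pysem],
        show PySem.List.pyGet? (d0 :: d1 :: dr) 1 = some d1 by simp [pysem]]
    dsimp only
    rw [foldl_range_const, Nat.add_comm ((d0 - c0).natAbs), Function.iterate_add_apply,
      stepB_iter_x d0 d1 _ c0 c1 _ rfl, stepB_iter_y d0 d1 _ c1 _ rfl]
    simp only [PySem.List.foldl_append_singleton_eq_map]
    unfold xseg yseg
    split_ifs <;> simp
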